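-- pv_equiv track=rewrite | github.com/nlvegan/verenigingen | verenigingen/tests/e_boekhouden/fixtures/cost_center_test_factory.py | _should_suggest_cost_center_rgs
-- ===== SOURCE A (Python) =====
-- from typing import Dict, List, Optional, Any, Tuple
--
-- def _should_suggest_cost_center_rgs(code: str, name: str) -> Tuple[bool, str]:
--     """RGS-based cost center suggestion logic"""
--     name_lower = name.lower()
--
--     # Expense groups are prime candidates
--     if code.startswith(('5', '6', '7')):
--         if any(keyword in name_lower for keyword in ['personeel', 'kosten', 'uitgaven', 'lasten']):
--             return True, "Expense group - good for cost tracking"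
--
--     # Revenue groups for departmental analysis
--     if code.startswith('3'):
--         if any(keyword in name_lower for keyword in ['opbrengst', 'omzet', 'verkoop']):
--             return True, "Revenue group - useful for departmental income tracking"
--
--     # Departmental indicators
--     if any(keyword in name_lower for keyword in ['afdeling', 'team', 'departement']):
--         return True, "Contains departmental keywords"
--
--     # Balance sheet items usually don't need cost centers
--     if code.startswith(('1', '2')):
--         return False, "Balance sheet item - cost center not needed"
--
--     return False, "Not suitable for cost center tracking"
-- ===== SOURCE B (Python) =====
-- from typing import Tuple
--
-- # Staged, data-driven variant: (1) one pass over a keyword->category map collects the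
-- # set of categories present in the name; (2) the code's leading digit is classified by
-- # a dict lookup; (3) the decision combines the two classifications.
--
-- _KEYWORD_CATS = [
--     ("personeel", "expense"), ("kosten", "expense"),
--     ("uitgaven", "expense"), ("lasten", "expense"),
--     ("opbrengst", "revenue"), ("omzet", "revenue"), ("verkoop", "revenue"),
--     ("afdeling", "dept"), ("team", "dept"), ("departement", "dept"),
-- ]
--
-- _CODE_CLASS = {"5": "expense", "6": "expense", "7": "expense",
--                "3": "revenue", "1": "balance", "2": "balance"}
--
-- _MATCH_MSG = {"expense": "Expense group - good for cost tracking",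
--               "revenue": "Revenue group - useful for departmental income tracking"}
--
--
-- def _should_suggest_cost_center_rgs(code: str, name: str) -> Tuple[bool, str]:
--     """RGS-based cost center suggestion logic (classification-table variant)."""
--     name_lower = name.lower()
--     cats = {cat for kw, cat in _KEYWORD_CATS if kw in name_lower}
--     cls = _CODE_CLASS.get(code[:1])
--     if cls in _MATCH_MSG and cls in cats:
--         return True, _MATCH_MSG[cls]
--     if "dept" in cats:
--         return True, "Contains departmental keywords"
--     if cls == "balance":
--         return False, "Balance sheet item - cost center not needed"
--     return False, "Not suitable for cost center tracking"
-- ===== Notes on version B (the rewrite author's own statement) =====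
-- stated objective: alternative
-- what changed: Replaced the if/elif keyword-scanning cascade by staged table classification: one pass over a keyword->category map builds the set of categories present in the name, the code's first character is classified by a dict lookup, and a short decision combines the two classifications.
import Mathlib
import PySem

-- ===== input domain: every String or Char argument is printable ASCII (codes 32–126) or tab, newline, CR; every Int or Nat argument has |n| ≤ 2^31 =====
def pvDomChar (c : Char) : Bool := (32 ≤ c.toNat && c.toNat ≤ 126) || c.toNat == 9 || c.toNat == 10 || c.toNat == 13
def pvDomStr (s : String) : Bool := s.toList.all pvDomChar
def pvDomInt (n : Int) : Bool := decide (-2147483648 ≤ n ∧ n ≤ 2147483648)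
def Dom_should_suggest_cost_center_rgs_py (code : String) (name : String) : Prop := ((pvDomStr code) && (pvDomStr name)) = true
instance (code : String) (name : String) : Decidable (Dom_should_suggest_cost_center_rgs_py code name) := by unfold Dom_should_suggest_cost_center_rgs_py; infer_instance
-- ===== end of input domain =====

-- B replaces A's hard-coded if-chain by staged classification tables: one pass over a
-- keyword->category map collects the categories present in the name, the code's first
-- character is classified by a dict lookup, and the decision combines the two
-- (objective: alternative structure, same cost).


-- ===== PORT A =====
def should_suggest_cost_center_rgs_py (code : String) (name : String) : Bool × String :=
  let name_lower := PySem.Str.lower name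
  -- nested `if startswith: if any(...): return` flattened to the exact conjunction
  -- (a keyword miss falls through to the next check, as in the Python)
  if (PySem.Str.startswith code "5" || PySem.Str.startswith code "6" || PySem.Str.startswith code "7")
       && ["personeel", "kosten", "uitgaven", "lasten"].any (fun k => PySem.Str.isIn k name_lower) then
    (true, "Expense group - good for cost tracking")
  else if PySem.Str.startswith code "3"
       && ["opbrengst", "omzet", "verkoop"].any (fun k => PySem.Str.isIn k name_lower) then
    (true, "Revenue group - useful for departmental income tracking")
  else if ["afdeling", "team", "departement"].any (fun k => PySem.Str.isIn k name_lower) then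
    (true, "Contains departmental keywords")
  else if PySem.Str.startswith code "1" || PySem.Str.startswith code "2" then
    (false, "Balance sheet item - cost center not needed")
  else
    (false, "Not suitable for cost center tracking")

-- ===== PORT B =====
def pvKeywordCats : List (String × String) :=
  [("personeel", "expense"), ("kosten", "expense"),
   ("uitgaven", "expense"), ("lasten", "expense"),
   ("opbrengst", "revenue"), ("omzet", "revenue"), ("verkoop", "revenue"),
   ("afdeling", "dept"), ("team", "dept"), ("departement", "dept")]

def pvCodeClass : PySem.Dict String String :=
  PySem.Dict.ofList
    [("5", "expense"), ("6", "expense"), ("7", "expense"),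
     ("3", "revenue"), ("1", "balance"), ("2", "balance")]

def pvMatchMsg : PySem.Dict String String :=
  PySem.Dict.ofList
    [("expense", "Expense group - good for cost tracking"),
     ("revenue", "Revenue group - useful for departmental income tracking")]

def should_suggest_cost_center_rgs_py_alt (code : String) (name : String) : Bool × String :=
  let name_lower := PySem.Str.lower name
  -- cats = {cat for kw, cat in _KEYWORD_CATS if kw in name_lower}
  let cats : PySem.Set String :=
    PySem.Set.ofList ((pvKeywordCats.filter (fun p => PySem.Str.isIn p.1 name_lower)).map (fun p => p.2))
  -- cls = _CODE_CLASS.get(code[:1])   (None when the first char is unclassified or code is empty)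
  let cls : Option String := PySem.Dict.get? pvCodeClass (PySem.Str.slice code none (some 1))
  -- `cls in _MATCH_MSG and cls in cats` (a None cls is in neither container)
  let inMsg : Bool := match cls with | some c => PySem.Dict.contains pvMatchMsg c | none => false
  let inCats : Bool := match cls with | some c => PySem.Set.contains cats c | none => false
  if inMsg && inCats then
    (true, match cls with | some c => PySem.Dict.getD pvMatchMsg c "" | none => "")
  else if PySem.Set.contains cats "dept" then
    (true, "Contains departmental keywords")
  else if cls == some "balance" then
    (false, "Balance sheet item - cost center not needed")
  else
    (false, "Not suitable for cost center tracking")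

-- ===== PRECONDITION & SPEC =====
def Spec_should_suggest_cost_center_rgs_py (code : String) (name : String) (out : Bool × String) : Prop := out = should_suggest_cost_center_rgs_py_alt code name
instance (code : String) (name : String) (out : Bool × String) : Decidable (Spec_should_suggest_cost_center_rgs_py code name out) := by unfold Spec_should_suggest_cost_center_rgs_py; infer_instance

-- ===== CLAIM (what is proved, stated in full; the proofs are below) =====
def Claim_equal_should_suggest_cost_center_rgs_py : Prop := ∀ (code : String) (name : String), Dom_should_suggest_cost_center_rgs_py code name → Spec_should_suggest_cost_center_rgs_py code name (should_suggest_cost_center_rgs_py code name)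

-- ===== LEMMAS AND PROOFS =====

-- membership of x in the deduplicated image of a filtered list, as a one-pass `any`
lemma pv_contains_ofList_map_filter {α β : Type} [BEq β] [LawfulBEq β]
    (l : List α) (q : α → Bool) (f : α → β) (x : β) :
    PySem.Set.contains (PySem.Set.ofList ((l.filter q).map f)) x
      = l.any (fun p => q p && f p == x) := by
  rw [Bool.eq_iff_iff]
  simp [PySem.Set.contains, PySem.Set.mem_ofList, List.any_eq_true, List.mem_filter]
  tauto

-- the dict lookup on code[:1] expressed through the first character (list side)
lemma pv_cls_nil :
    PySem.Dict.get? pvCodeClass (String.ofList (PySem.List.slice ([] : List Char) none (some 1))) = none := by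
  decide

lemma pv_cls_cons (c : Char) (r : List Char) :
    PySem.Dict.get? pvCodeClass (String.ofList (PySem.List.slice (c::r) none (some 1)))
      = (if c == '5' || c == '6' || c == '7' then some "expense"
         else if c == '3' then some "revenue"
         else if c == '1' || c == '2' then some "balance"
         else none) := by
  rw [show PySem.List.slice (c::r) none (some 1) = [c] from rfl]
  rw [show pvCodeClass = PySem.Dict.mk
    [("5", "expense"), ("6", "expense"), ("7", "expense"),
     ("3", "revenue"), ("1", "balance"), ("2", "balance")] from rfl]
  simp only [PySem.Dict.get?_mk_cons]
  have e : ∀ (d : Char), ((String.ofList [d] : String) == String.ofList [c]) = (c == d) := by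
    intro d
    rw [Bool.eq_iff_iff]
    simp [String.ext_iff]
    exact eq_comm
  rw [show ("5":String) = String.ofList ['5'] from rfl, e '5',
      show ("6":String) = String.ofList ['6'] from rfl, e '6',
      show ("7":String) = String.ofList ['7'] from rfl, e '7',
      show ("3":String) = String.ofList ['3'] from rfl, e '3',
      show ("1":String) = String.ofList ['1'] from rfl, e '1',
      show ("2":String) = String.ofList ['2'] from rfl, e '2']
  cases h5 : (c == '5') <;> cases h6 : (c == '6') <;> cases h7 : (c == '7') <;>
    cases h3 : (c == '3') <;> cases h1 : (c == '1') <;> cases h2 : (c == '2') <;>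
    simp_all [show ∀ (t : String), (PySem.Dict.mk ([] : List (String × String))).get? t = none from fun _ => rfl]

-- a one-element prefix test is a test on the first character
lemma pv_pfx (d c : Char) (r : List Char) : List.isPrefixOf [d] (c::r) = (c == d) := by
  simp only [List.isPrefixOf, Bool.and_true]
  rw [Bool.eq_iff_iff]
  simp [BEq.comm]

-- the three category queries on cats, as A's keyword `any` tests
lemma pv_cats_expense (nl : String) :
    PySem.Set.contains
      (PySem.Set.ofList ((pvKeywordCats.filter (fun p => PySem.Str.isIn p.1 nl)).map (fun p => p.2))) "expense"
      = (["personeel", "kosten", "uitgaven", "lasten"].any fun k => PySem.Str.isIn k nl) := by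
  rw [pv_contains_ofList_map_filter]
  simp [pvKeywordCats]

lemma pv_cats_revenue (nl : String) :
    PySem.Set.contains
      (PySem.Set.ofList ((pvKeywordCats.filter (fun p => PySem.Str.isIn p.1 nl)).map (fun p => p.2))) "revenue"
      = (["opbrengst", "omzet", "verkoop"].any fun k => PySem.Str.isIn k nl) := by
  rw [pv_contains_ofList_map_filter]
  simp [pvKeywordCats]

lemma pv_cats_dept (nl : String) :
    PySem.Set.contains
      (PySem.Set.ofList ((pvKeywordCats.filter (fun p => PySem.Str.isIn p.1 nl)).map (fun p => p.2))) "dept"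
      = (["afdeling", "team", "departement"].any fun k => PySem.Str.isIn k nl) := by
  rw [pv_contains_ofList_map_filter]
  simp [pvKeywordCats]

lemma pv_cats_balance (nl : String) :
    PySem.Set.contains
      (PySem.Set.ofList ((pvKeywordCats.filter (fun p => PySem.Str.isIn p.1 nl)).map (fun p => p.2))) "balance"
      = false := by
  rw [pv_contains_ofList_map_filter]
  simp [pvKeywordCats]

-- A and B after bridging to the list side, over an arbitrary first-argument character list
lemma pv_main (l : List Char) (nl : String) :
    (if (['5'].isPrefixOf l || ['6'].isPrefixOf l || ['7'].isPrefixOf l) &&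
          (["personeel", "kosten", "uitgaven", "lasten"].any fun k => PySem.Str.isIn k nl) then
       ((true, "Expense group - good for cost tracking") : Bool × String)
     else if ['3'].isPrefixOf l && (["opbrengst", "omzet", "verkoop"].any fun k => PySem.Str.isIn k nl) then
       (true, "Revenue group - useful for departmental income tracking")
     else if ["afdeling", "team", "departement"].any fun k => PySem.Str.isIn k nl then
       (true, "Contains departmental keywords")
     else if ['1'].isPrefixOf l || ['2'].isPrefixOf l then
       (false, "Balance sheet item - cost center not needed")
     else (false, "Not suitable for cost center tracking"))
    =
    (if ((match PySem.Dict.get? pvCodeClass (String.ofList (PySem.List.slice l none (some 1))) with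
           | some c => pvMatchMsg.contains c
           | none => false) &&
          match PySem.Dict.get? pvCodeClass (String.ofList (PySem.List.slice l none (some 1))) with
           | some c =>
             (PySem.Set.ofList
               ((pvKeywordCats.filter (fun p => PySem.Str.isIn p.1 nl)).map (fun p => p.2))).contains c
           | none => false) then
       ((true,
         match PySem.Dict.get? pvCodeClass (String.ofList (PySem.List.slice l none (some 1))) with
         | some c => pvMatchMsg.getD c ""
         | none => "") : Bool × String)
     else if (PySem.Set.ofList
               ((pvKeywordCats.filter (fun p => PySem.Str.isIn p.1 nl)).map (fun p => p.2))).contains "dept" then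
       (true, "Contains departmental keywords")
     else if PySem.Dict.get? pvCodeClass (String.ofList (PySem.List.slice l none (some 1))) == some "balance" then
       (false, "Balance sheet item - cost center not needed")
     else (false, "Not suitable for cost center tracking")) := by
  rcases l with _ | ⟨c, r⟩
  · rw [pv_cls_nil]
    simp only [pv_cats_dept, Bool.false_and, Bool.and_false, Bool.false_eq_true, if_false,
      show List.isPrefixOf ['5'] ([] : List Char) = false from rfl,
      show List.isPrefixOf ['6'] ([] : List Char) = false from rfl,
      show List.isPrefixOf ['7'] ([] : List Char) = false from rfl,
      show List.isPrefixOf ['3'] ([] : List Char) = false from rfl,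
      show List.isPrefixOf ['1'] ([] : List Char) = false from rfl,
      show List.isPrefixOf ['2'] ([] : List Char) = false from rfl,
      show ((none : Option String) == some "balance") = false from rfl,
      Bool.or_false]
  · rw [pv_cls_cons]
    simp only [pv_pfx]
    cases h5 : (c == '5') <;> cases h6 : (c == '6') <;> cases h7 : (c == '7') <;>
      cases h3 : (c == '3') <;> cases h1 : (c == '1') <;> cases h2 : (c == '2') <;>
      simp only [h5, h6, h7, h3, h1, h2, Bool.false_eq_true, eq_self_iff_true, if_true, if_false,
        Bool.false_or, Bool.or_false, Bool.true_or, Bool.or_true,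
        Bool.or_self, Bool.false_and, Bool.true_and, Bool.and_false, Bool.and_true, pv_cats_expense, pv_cats_revenue, pv_cats_dept, pv_cats_balance,
        show pvMatchMsg.contains "expense" = true from rfl,
        show pvMatchMsg.contains "revenue" = true from rfl,
        show pvMatchMsg.contains "balance" = false from rfl,
        show pvMatchMsg.getD "expense" "" = "Expense group - good for cost tracking" from rfl,
        show pvMatchMsg.getD "revenue" "" = "Revenue group - useful for departmental income tracking" from rfl,
        show ((some "expense" : Option String) == some "balance") = false from rfl,
        show ((some "revenue" : Option String) == some "balance") = false from rfl,
        show ((some "balance" : Option String) == some "balance") = true from rfl,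
        show ((none : Option String) == some "balance") = false from rfl] <;>
      simp_all  -- the remaining cases assert two distinct first characters at once

-- ===== VERDICT (by name: the statement is the Claim_ definition above) =====
theorem should_suggest_cost_center_rgs_py_spec : Claim_equal_should_suggest_cost_center_rgs_py := by
  intro code name _
  unfold Spec_should_suggest_cost_center_rgs_py
  unfold should_suggest_cost_center_rgs_py should_suggest_cost_center_rgs_py_alt
  simp only [PySem.Str.startswith, PySem.Str.slice, PySem.Chars.slice, PySem.Chars.startswith]
  simp only [show ("5":String).toList = ['5'] from rfl, show ("6":String).toList = ['6'] from rfl,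
      show ("7":String).toList = ['7'] from rfl, show ("3":String).toList = ['3'] from rfl,
      show ("1":String).toList = ['1'] from rfl, show ("2":String).toList = ['2'] from rfl]
  exact pv_main code.toList (PySem.Str.lower name)
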